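-- pv_equiv track=rewrite | github.com/colesbury/nogil-micro-benchmarks | benchmark.py | object_cfunction
-- ===== SOURCE A (Python) =====
-- WORK_SCALE = 100
--
-- def object_cfunction(idx):
--     accu = 0
--     tab = [idx] * 100
--     for i in range(10000 * WORK_SCALE):
--         tab.pop(0)
--         tab.append(i)
--         accu += tab[50]
--     return accu
-- ===== SOURCE B (Python) =====
-- WORK_SCALE = 100
--
-- def object_cfunction(idx):
--     # Closed form: the first 49 iterations read idx at position 50;
--     # every later iteration i reads i - 49.
--     n = 10000 * WORK_SCALE
--     return 49 * idx + (n - 50) * (n - 49) // 2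
-- ===== Notes on version B (the rewrite author's own statement) =====
-- stated objective: faster
-- what changed: Replaced the million-iteration sliding-window loop by the closed form 49*idx + (n-50)(n-49)/2, derived from the fact that tab[50] is idx for the first 49 iterations and i-49 afterwards.
import Mathlib
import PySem

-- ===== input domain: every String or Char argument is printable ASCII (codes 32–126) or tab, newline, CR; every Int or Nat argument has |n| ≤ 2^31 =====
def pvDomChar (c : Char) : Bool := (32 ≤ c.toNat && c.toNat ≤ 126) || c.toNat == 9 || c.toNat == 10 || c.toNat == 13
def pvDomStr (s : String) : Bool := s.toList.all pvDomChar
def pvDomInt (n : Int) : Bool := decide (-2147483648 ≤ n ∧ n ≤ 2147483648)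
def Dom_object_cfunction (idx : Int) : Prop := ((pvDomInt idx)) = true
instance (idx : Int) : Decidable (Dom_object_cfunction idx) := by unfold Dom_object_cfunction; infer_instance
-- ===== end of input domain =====

-- B replaces A's million-iteration sliding-window loop by the exact closed form
-- 49*idx + (n-50)(n-49)//2 (objective: faster).

-- ===== PORT A =====
-- the for-loop over range(10000*WORK_SCALE), state = (accu, tab);
-- loop body: tab.pop(0); tab.append(i); accu += tab[50]
-- (tab always has 100 elements, so pop(0) never raises and tab[50] is in range;
--  the `none`/default branches below are unreachable)
def pvLoopA (accu : Int) (tab : List Int) : List Int → Int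
  | [] => accu
  | i :: rest =>
    match PySem.List.pop? tab 0 with
    | some (_, t) =>
        let tab' := t ++ [i]
        pvLoopA (accu + PySem.List.pyGetD tab' 50 0) tab' rest
    | none => pvLoopA accu tab rest

def object_cfunction (idx : Int) : Int :=
  pvLoopA 0 (List.replicate 100 idx) (PySem.List.pyRange 0 (10000 * 100) 1)

-- ===== PORT B =====
def object_cfunction_alt (idx : Int) : Int :=
  let n : Int := 10000 * 100
  49 * idx + PySem.Int.floordiv ((n - 50) * (n - 49)) 2

-- ===== PRECONDITION & SPEC =====
def Spec_object_cfunction (idx : Int) (out : Int) : Prop := out = object_cfunction_alt idx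
instance (idx : Int) (out : Int) : Decidable (Spec_object_cfunction idx out) := by unfold Spec_object_cfunction; infer_instance

-- ===== CLAIM (what is proved, stated in full; the proofs are below) =====
def Claim_equal_object_cfunction : Prop := ∀ (idx : Int), Dom_object_cfunction idx → Spec_object_cfunction idx (object_cfunction idx)

-- ===== LEMMAS AND PROOFS =====

-- the window once all initial `idx` copies have been pushed out: [m, m+1, …, m+99]
def pvWin (m : Int) : List Int := (List.range 100).map (fun (j : Nat) => m + (j : Int))

-- accu after the first k iterations, idx-free part
def pvAcc : Nat → Int
  | 0 => 0
  | k + 1 => pvAcc k + (if k < 49 then 0 else (k : Int) - 49)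

-- accu contributed by k steady-state iterations starting at window pvWin m
def pvT : Nat → Int → Int
  | 0, _ => 0
  | k + 1, m => (m + 51) + pvT k (m + 1)

lemma pvLoopA_cons (a : Int) (x : Int) (t : List Int) (i : Int) (rest : List Int) :
    pvLoopA a (x :: t) (i :: rest)
      = pvLoopA (a + PySem.List.pyGetD (t ++ [i]) 50 0) (t ++ [i]) rest := by
  simp [pvLoopA, PySem.List.pop?_zero_cons]

lemma pvL1 (idx : Int) : ∀ k : Nat, k ≤ 100 → ∀ L : List Int,
    pvLoopA 0 (List.replicate 100 idx) (PySem.List.pyRange 0 (k : Int) 1 ++ L)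
      = pvLoopA (((min k 49 : Nat) : Int) * idx + pvAcc k)
          (List.replicate (100 - k) idx ++ (List.range k).map (fun (j : Nat) => (j : Int))) L := by
  intro k
  induction k with
  | zero => intro _ L; simp [pvAcc]
  | succ k ih =>
    intro hk L
    have hk' : k ≤ 100 := by omega
    have hcast : ((k : Int) + 1) = ((k + 1 : Nat) : Int) := by push_cast; ring
    rw [← hcast, PySem.List.pyRange_one_succ_right (by positivity), List.append_assoc,
        List.singleton_append, ih hk' ((k : Int) :: L)]
    have hrep : List.replicate (100 - k) idx = idx :: List.replicate (99 - k) idx := by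
      have : 100 - k = (99 - k) + 1 := by omega
      rw [this, List.replicate_succ]
    rw [hrep]
    show pvLoopA _ (idx :: (List.replicate (99 - k) idx ++ _)) ((k : Int) :: L) = _
    rw [pvLoopA_cons]
    have hmap : (List.range k).map (fun (j : Nat) => (j : Int)) ++ [(k : Int)]
        = (List.range (k + 1)).map (fun (j : Nat) => (j : Int)) := by
      rw [List.range_succ, List.map_append]; simp
    rw [List.append_assoc, hmap]
    have hget : PySem.List.pyGetD
        (List.replicate (99 - k) idx ++ (List.range (k + 1)).map (fun (j : Nat) => (j : Int))) 50 0
        = if k < 49 then idx else (k : Int) - 49 := by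
      rw [PySem.List.pyGetD_ofNat', List.getD_eq_getElem?_getD]
      by_cases h : k < 49
      · rw [List.getElem?_append_left
              (by rw [List.length_replicate]; show (50 : Nat) < 99 - k; omega),
            List.getElem?_replicate, if_pos (by show (50 : Nat) < 99 - k; omega), if_pos h]
        rfl
      · rw [List.getElem?_append_right
              (by rw [List.length_replicate]; show 99 - k ≤ (50 : Nat); omega)]
        simp only [List.length_replicate]
        rw [List.getElem?_map, List.getElem?_range (by show (50 : Nat) - (99 - k) < k + 1; omega)]
        simp only [Option.map_some, Option.getD_some, if_neg h]
        show ((((50 : Nat) - (99 - k)) : Nat) : Int) = (k : Int) - 49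
        omega
    rw [hget]
    have hsub : 100 - (k + 1) = 99 - k := by omega
    rw [hsub]
    have hacc : ((min k 49 : Nat) : Int) * idx + pvAcc k + (if k < 49 then idx else (k : Int) - 49)
        = ((min (k + 1) 49 : Nat) : Int) * idx + pvAcc (k + 1) := by
      simp only [pvAcc]
      by_cases h : k < 49
      · have h1 : min (k + 1) 49 = min k 49 + 1 := by omega
        rw [h1, if_pos h, if_pos h]
        push_cast
        ring
      · have h1 : min (k + 1) 49 = min k 49 := by omega
        rw [h1, if_neg h, if_neg h]
        ring
    rw [hacc]

lemma pvWin_head (m : Int) :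
    pvWin m = m :: (List.range 99).map (fun (j : Nat) => (m + 1) + (j : Int)) := by
  have h : List.range 100 = 0 :: List.map Nat.succ (List.range 99) := List.range_succ_eq_map
  rw [pvWin, h, List.map_cons, List.map_map]
  refine List.cons_eq_cons.mpr ⟨by simp, ?_⟩
  apply List.map_congr_left
  intro j _
  simp only [Function.comp_apply, Nat.succ_eq_add_one]
  push_cast
  ring

lemma pvWin_succ (m : Int) :
    pvWin (m + 1) = (List.range 99).map (fun (j : Nat) => (m + 1) + (j : Int)) ++ [m + 100] := by
  rw [pvWin, List.range_succ, List.map_append]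
  refine congrArg₂ _ rfl ?_
  simp
  ring

lemma pvWin_get50 (m : Int) : PySem.List.pyGetD (pvWin m) 50 0 = m + 50 := by
  rw [pvWin, PySem.List.pyGetD_ofNat', List.getD_eq_getElem?_getD,
      List.getElem?_map, List.getElem?_range (by show (50 : Nat) < 100; omega)]
  simp only [Option.map_some, Option.getD_some]
  show m + ((50 : Nat) : Int) = m + 50
  norm_num

lemma pvLoopA_win (a : Int) (m : Int) (rest : List Int) :
    pvLoopA a (pvWin m) ((m + 100) :: rest) = pvLoopA (a + (m + 51)) (pvWin (m + 1)) rest := by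
  rw [pvWin_head, pvLoopA_cons, ← pvWin_succ, pvWin_get50]
  ring_nf

lemma pvL2 : ∀ (k : Nat) (a m : Int),
    pvLoopA a (pvWin m) (PySem.List.pyRange (m + 100) (m + 100 + (k : Int)) 1)
      = a + pvT k m := by
  intro k
  induction k with
  | zero => intro a m; simp [PySem.List.pyRange_one_eq_nil, pvLoopA, pvT]
  | succ k ih =>
    intro a m
    rw [PySem.List.pyRange_one_cons (by push_cast; omega), pvLoopA_win]
    have he1 : m + 100 + 1 = (m + 1) + 100 := by ring
    have he2 : m + 100 + ((k + 1 : Nat) : Int) = (m + 1) + 100 + (k : Int) := by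
      push_cast; ring
    rw [he1, he2, ih (a + (m + 51)) (m + 1)]
    simp only [pvT]
    ring

lemma pvT_two : ∀ (k : Nat) (m : Int),
    2 * pvT k m = 2 * (k : Int) * m + 102 * (k : Int) + (k : Int) * ((k : Int) - 1) := by
  intro k
  induction k with
  | zero => intro m; simp [pvT]
  | succ k ih =>
    intro m
    have := ih (m + 1)
    simp only [pvT]
    push_cast
    linarith [this]

lemma pvT_value : pvT 999900 0 = 499950499950 := by
  have h := pvT_two 999900 0
  norm_num at h
  omega

lemma pvInit_win (idx : Int) :
    List.replicate (100 - 100) idx ++ (List.range 100).map (fun (j : Nat) => (j : Int)) = pvWin 0 := by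
  simp [pvWin]

set_option maxRecDepth 2000 in
lemma pvAcc_100 : pvAcc 100 = 1275 := by decide

lemma pvFdiv : PySem.Int.floordiv ((10000 * 100 - 50) * (10000 * 100 - 49)) 2 = 499950501225 := by
  norm_num [PySem.Int.floordiv, Int.fdiv_eq_ediv_of_nonneg]

lemma pvKey (idx : Int) : object_cfunction idx = 49 * idx + 499950501225 := by
  show pvLoopA 0 (List.replicate 100 idx) (PySem.List.pyRange 0 (10000 * 100) 1)
      = 49 * idx + 499950501225
  rw [PySem.List.pyRange_one_append 0 ((100 : Nat) : Int) (10000 * 100) (by norm_num) (by norm_num),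
      pvL1 idx 100 (le_refl _), pvInit_win,
      show ((100 : Nat) : Int) = 0 + 100 from by norm_num,
      show (10000 * 100 : Int) = 0 + 100 + ((999900 : Nat) : Int) from by norm_num,
      pvL2 999900]
  rw [pvAcc_100, pvT_value, show ((min 100 49 : Nat) : Int) = 49 from by norm_num]
  omega

-- ===== VERDICT (by name: the statement is the Claim_ definition above) =====
theorem object_cfunction_spec : Claim_equal_object_cfunction := by
  intro idx _
  show object_cfunction idx = object_cfunction_alt idx
  rw [pvKey idx]
  show (49 * idx + 499950501225 : Int)
      = 49 * idx + PySem.Int.floordiv ((10000 * 100 - 50) * (10000 * 100 - 49)) 2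
  rw [pvFdiv]
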